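-- pv_equiv track=rewrite | github.com/robynskyrme/AoC2024 | 07_Bridge-Repair_Part-Two.py | concat_perms
-- ===== SOURCE A (Python) =====
-- def binarystr(n,length):
--     slab = str(bin(n))[2:]
--     slab = slab.rjust(length,"0")
--     return slab
--
-- def concat_perms(list):
--     d = len(list)-1
--     ceiling = 2**d
--
--     table = []
--
--     for i in range(ceiling):
--         newlist = []
--         newlist.append(str(list[0]))
--         binary = binarystr(i,d)
--
--         for j in range(d):
--             concat = binary[j]
--             if concat == '0':
--                 newlist.append(str(list[j+1]))
--             if concat == '1':
--                 newlist[len(newlist)-1] += str(list[j+1])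
--
--         for k in range(len(newlist)):
--             newlist[k] = int(newlist[k])
--
--         table.append(newlist)
--
--     return table
-- ===== SOURCE B (Python) =====
-- def concat_perms(list):
--     # incremental doubling: each element either starts a new group or merges into the last
--     table = [[str(list[0])]]
--     for x in list[1:]:
--         s = str(x)
--         table = [g2 for g in table
--                  for g2 in (g + [s], g[:-1] + [g[-1] + s])]
--     return [[int(v) for v in g] for g in table]
-- ===== Notes on version B (the rewrite author's own statement) =====
-- stated objective: simpler
-- what changed: B builds the table by incremental doubling (each next element either starts a new group or merges into the last group of every existing grouping) instead of enumerating 2^(n-1) binary indices and decoding a padded bin() string per row.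
import Mathlib
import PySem

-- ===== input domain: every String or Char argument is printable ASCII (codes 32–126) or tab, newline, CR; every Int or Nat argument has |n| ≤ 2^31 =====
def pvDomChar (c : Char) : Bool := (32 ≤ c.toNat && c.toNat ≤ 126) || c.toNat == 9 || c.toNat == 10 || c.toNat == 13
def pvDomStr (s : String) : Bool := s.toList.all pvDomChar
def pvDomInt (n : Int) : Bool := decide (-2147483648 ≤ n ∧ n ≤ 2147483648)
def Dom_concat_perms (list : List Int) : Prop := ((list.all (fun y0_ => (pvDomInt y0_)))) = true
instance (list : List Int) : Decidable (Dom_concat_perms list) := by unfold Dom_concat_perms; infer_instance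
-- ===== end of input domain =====

-- B replaces A's binary-index decoding with incremental doubling of the table; objective: simpler, same exponential cost.


-- ===== PORT A =====
-- str(bin(n))[2:] via PySem.Int.toBinChars0b + slice; rjust(length,"0") hand-ported as exact left padding
-- (kept as List Char, the code-point list of the Python string).
def binarystr (n : Int) (length : Int) : List Char :=
  let slab := PySem.List.slice (PySem.Int.toBinChars0b n) (some 2) none
  List.replicate (length.toNat - slab.length) '0' ++ slab

def concat_perms (list : List Int) : List (List Int) :=
  let d : Int := PySem.List.len list - 1
  -- 2**d: on list = [] Python computes 2**(-1) = 0.5 and range(0.5) raises TypeError — excluded by Pre_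
  let ceiling : Int := 2 ^ d.toNat
  (PySem.List.pyRange 0 ceiling 1).foldl (fun table i =>
    let newlist : List String := [PySem.Int.toStr (PySem.List.pyGetD list 0 0)]
    let binary := binarystr i d
    let newlist := (PySem.List.pyRange 0 d 1).foldl (fun nl j =>
      let concatc := PySem.List.pyGetD binary j ' '
      let nl := if concatc = '0'
        then nl ++ [PySem.Int.toStr (PySem.List.pyGetD list (j + 1) 0)] else nl
      let nl := if concatc = '1'
        then nl.set (nl.length - 1)
          ((nl.getD (nl.length - 1) "") ++ PySem.Int.toStr (PySem.List.pyGetD list (j + 1) 0))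
        else nl
      nl) newlist
    -- the k-loop replaces each element by int(element) once, in order: ported as a map
    -- (int() raises ValueError on strings with an interior '-'; those inputs are excluded by Pre_)
    let ints := newlist.map (fun s => (PySem.Int.ofStr? s).getD 0)
    table ++ [ints]) []

-- ===== PORT B =====
def concat_perms_alt (list : List Int) : List (List Int) :=
  let table : List (List String) := [[PySem.Int.toStr (PySem.List.pyGetD list 0 0)]]
  let table := (PySem.List.slice list (some 1) none).foldl (fun table x =>
    let s := PySem.Int.toStr x
    table.flatMap (fun g =>
      [g ++ [s],
       PySem.List.slice g none (some (-1)) ++ [((PySem.List.pyGet? g (-1)).getD "") ++ s]])) table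
  table.map (fun g => g.map (fun v => (PySem.Int.ofStr? v).getD 0))

-- ===== PRECONDITION & SPEC =====
-- Pre_ excludes exactly the inputs where the Python A raises: the empty list (TypeError from
-- range(2**-1)) and lists with a negative element after the first (ValueError from int() on a
-- concatenation with an interior '-'); B raises on exactly the same inputs.
def Pre_concat_perms (list : List Int) : Prop := list ≠ [] ∧ ∀ x ∈ list.drop 1, 0 ≤ x
instance (list : List Int) : Decidable (Pre_concat_perms list) := by
  unfold Pre_concat_perms; infer_instance
def pvWitness_concat_perms : List Int := [2, 7, 15]
def Spec_concat_perms (list : List Int) (out : List (List Int)) : Prop := out = concat_perms_alt list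
instance (list : List Int) (out : List (List Int)) : Decidable (Spec_concat_perms list out) := by
  unfold Spec_concat_perms; infer_instance

-- ===== CLAIM (what is proved, stated in full; the proofs are below) =====
def Claim_equal_concat_perms : Prop := ∀ (list : List Int), Dom_concat_perms list → Pre_concat_perms list → Spec_concat_perms list (concat_perms list)

-- ===== LEMMAS AND PROOFS =====

def binAux : Nat → List Char
  | 0 => []
  | n + 1 => binAux ((n + 1) / 2) ++ [if (n + 1) % 2 = 1 then '1' else '0']

def binChars (n : Nat) : List Char := if n = 0 then ['0'] else binAux n

theorem binAux_pos (n : Nat) (h : 0 < n) :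
    binAux n = binAux (n / 2) ++ [if n % 2 = 1 then '1' else '0'] := by
  cases n with
  | zero => omega
  | succ m => rw [binAux]

theorem toDigitsCore_eq_binChars : ∀ (f n : Nat) (acc : List Char), n < f →
    Nat.toDigitsCore 2 f n acc = binChars n ++ acc := by
  intro f
  induction f with
  | zero => omega
  | succ f ih =>
    intro n acc hn
    rw [Nat.toDigitsCore]
    by_cases h0 : n / 2 = 0
    · have hn01 : n = 0 ∨ n = 1 := by omega
      simp only [h0]
      rcases hn01 with h | h <;> subst h <;> simp [binChars, binAux] <;> rfl
    · rw [if_neg h0, ih (n / 2) _ (by omega)]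
      have hnpos : 0 < n := by omega
      conv_rhs => rw [binChars, if_neg (by omega), binAux_pos n hnpos]
      rw [binChars, if_neg h0]
      have : Nat.digitChar (n % 2) = (if n % 2 = 1 then '1' else '0') := by
        have : n % 2 = 0 ∨ n % 2 = 1 := by omega
        rcases this with h | h <;> simp [h] <;> rfl
      simp [this]

theorem toDigits_eq_binChars (n : Nat) : Nat.toDigits 2 n = binChars n := by
  have := toDigitsCore_eq_binChars (n + 1) n [] (by omega)
  simpa [Nat.toDigits] using this

def padTo (k : Nat) (cs : List Char) : List Char := List.replicate (k - cs.length) '0' ++ cs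

theorem binarystr_eq (i : Int) (hi : 0 ≤ i) (d : Int) :
    binarystr i d = padTo d.toNat (binChars i.toNat) := by
  have h0b : PySem.Int.toBinChars0b i = '0' :: 'b' :: Nat.toDigits 2 i.toNat := by
    simp [PySem.Int.toBinChars0b, not_lt.mpr hi]
  have hs : PySem.List.slice ('0' :: 'b' :: binChars i.toNat) (some 2) none
      = binChars i.toNat := by
    rw [show ((2:Int)) = ((2:Nat):Int) by norm_num, PySem.List.slice_from_natCast]
    rfl
  rw [binarystr]
  simp only [h0b, toDigits_eq_binChars, hs, padTo]

theorem binAux_length_le : ∀ (k n : Nat), n < 2 ^ k → (binAux n).length ≤ k := by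
  intro k
  induction k with
  | zero => intro n h; have h0 : n = 0 := by omega
            subst h0; simp [binAux]
  | succ k ih =>
    intro n h
    rcases Nat.eq_zero_or_pos n with h0 | h0
    · subst h0; simp [binAux]
    · rw [binAux_pos n h0]
      have := ih (n / 2) (by omega)
      simp only [List.length_append, List.length_singleton]
      omega

theorem padTo_cons_zero (k : Nat) (cs : List Char) (h : cs.length ≤ k) :
    padTo (k + 1) cs = '0' :: padTo k cs := by
  unfold padTo
  rw [show k + 1 - cs.length = (k - cs.length) + 1 by omega, List.replicate_succ]
  simp

theorem padTo_snoc (k : Nat) (cs : List Char) (c : Char) :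
    padTo (k + 1) (cs ++ [c]) = padTo k cs ++ [c] := by
  unfold padTo
  simp [show k + 1 - (cs.length + 1) = k - cs.length by omega]

theorem binAux_msb : ∀ (k i : Nat), i < 2 ^ k →
    binAux (2 ^ k + i) = '1' :: padTo k (binAux i) := by
  intro k
  induction k with
  | zero =>
    intro i h
    have h0 : i = 0 := by omega
    subst h0
    rw [show 2 ^ 0 + 0 = 1 by norm_num, binAux_pos 1 one_pos]
    simp [binAux, padTo]
  | succ k ih =>
    intro i h
    have hpos : 0 < 2 ^ (k + 1) + i := by positivity
    rw [binAux_pos _ hpos]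
    have hdiv : (2 ^ (k + 1) + i) / 2 = 2 ^ k + i / 2 := by omega
    have hmod : (2 ^ (k + 1) + i) % 2 = i % 2 := by omega
    rw [hdiv, hmod, ih (i / 2) (by omega)]
    have : padTo (k + 1) (binAux i) = padTo k (binAux (i / 2)) ++ [if i % 2 = 1 then '1' else '0'] := by
      rcases Nat.eq_zero_or_pos i with h0 | h0
      · subst h0
        simp [binAux, padTo, List.replicate_succ' (n := k)]
      · rw [binAux_pos i h0, padTo_snoc]
    rw [this]
    simp

theorem take_padTo_binChars : ∀ (k i : Nat), i < 2 ^ k →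
    (padTo k (binChars i)).take k = padTo k (binAux i) := by
  intro k i h
  rcases Nat.eq_zero_or_pos i with h0 | h0
  · subst h0
    cases k with
    | zero => simp [padTo, binChars, binAux]
    | succ k =>
      have : padTo (k + 1) (binChars 0) = List.replicate (k + 1) '0' := by
        simp [padTo, binChars, List.replicate_succ' (n := k)]
      rw [this]
      simp [binAux, padTo]
  · have hb : binChars i = binAux i := by rw [binChars, if_neg (by omega)]
    rw [hb]
    have hlen : (padTo k (binAux i)).length = k := by
      have := binAux_length_le k i h
      simp [padTo]; omega
    rw [List.take_of_length_le (le_of_eq hlen)]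

def rowStr : String → List (Char × String) → List String
  | p, [] => [p]
  | p, (c, s) :: rest =>
      if c = '0' then p :: rowStr s rest
      else if c = '1' then rowStr (p ++ s) rest
      else rowStr p rest

def bitsLists : Nat → List (List Char)
  | 0 => [[]]
  | k + 1 => (bitsLists k).flatMap (fun bs => [bs ++ ['0'], bs ++ ['1']])

theorem bitsLists_length : ∀ (k : Nat), ∀ bs ∈ bitsLists k, bs.length = k := by
  intro k
  induction k with
  | zero => simp [bitsLists]
  | succ k ih =>
    intro bs hbs
    simp only [bitsLists, List.mem_flatMap] at hbs
    obtain ⟨cs, hcs, hmem⟩ := hbs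
    have := ih cs hcs
    simp at hmem
    rcases hmem with h | h <;> subst h <;> simp [this]

theorem bitsLists_cons (k : Nat) :
    bitsLists (k + 1) =
      (bitsLists k).map (fun bs => '0' :: bs) ++ (bitsLists k).map (fun bs => '1' :: bs) := by
  induction k with
  | zero => simp [bitsLists]
  | succ k ih =>
    rw [show bitsLists (k + 1 + 1) = (bitsLists (k + 1)).flatMap
        (fun bs => [bs ++ ['0'], bs ++ ['1']]) from rfl]
    conv_lhs => rw [ih]
    rw [show bitsLists (k + 1) = (bitsLists k).flatMap
        (fun bs => [bs ++ ['0'], bs ++ ['1']]) from rfl]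
    simp [List.flatMap_append, List.flatMap_map, List.map_flatMap]

theorem enum_eq_bitsLists : ∀ (k : Nat),
    (List.range (2 ^ k)).map (fun i => padTo k (binAux i)) = bitsLists k := by
  intro k
  induction k with
  | zero => simp [binAux, padTo, bitsLists]
  | succ k ih =>
    rw [pow_succ, mul_two, List.range_add, List.map_append, List.map_map]
    rw [bitsLists_cons]
    congr 1
    · rw [← ih, List.map_map]
      apply List.map_congr_left
      intro i hi
      simp only [List.mem_range] at hi
      simp only [Function.comp]
      rw [padTo_cons_zero k _ (binAux_length_le k i hi)]
    · rw [← ih, List.map_map]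
      apply List.map_congr_left
      intro i hi
      simp only [List.mem_range] at hi
      simp only [Function.comp]
      rw [binAux_msb k i hi]
      have hlen : (padTo k (binAux i)).length = k := by
        have := binAux_length_le k i hi
        simp [padTo]; omega
      conv_lhs => rw [padTo]
      rw [show k + 1 - ('1' :: padTo k (binAux i)).length = 0 by
        simp only [List.length_cons, hlen]; omega]
      simp

theorem rowStr_ne_nil (p : String) (ps : List (Char × String)) : rowStr p ps ≠ [] := by
  induction ps generalizing p with
  | nil => simp [rowStr]
  | cons q rest ih =>
    obtain ⟨c, s⟩ := q
    rw [rowStr]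
    split_ifs <;> simp [ih]

theorem rowStr_snoc0 (p s : String) : ∀ (ps : List (Char × String)),
    rowStr p (ps ++ [('0', s)]) = rowStr p ps ++ [s] := by
  intro ps
  induction ps generalizing p with
  | nil => simp [rowStr]
  | cons q rest ih =>
    obtain ⟨c, s'⟩ := q
    simp only [List.cons_append, rowStr]
    split_ifs <;> simp [ih]

theorem rowStr_snoc1 (p s : String) : ∀ (ps : List (Char × String)),
    rowStr p (ps ++ [('1', s)]) =
      (rowStr p ps).dropLast ++ [((rowStr p ps).getLast?.getD "") ++ s] := by
  intro ps
  induction ps generalizing p with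
  | nil => simp [rowStr]
  | cons q rest ih =>
    obtain ⟨c, s'⟩ := q
    simp only [List.cons_append, rowStr]
    split_ifs
    · -- c = '0'
      rw [ih]
      obtain ⟨y, ys, hys⟩ := List.exists_cons_of_ne_nil (rowStr_ne_nil s' rest)
      rw [hys]
      simp
    · rw [ih]
    · rw [ih]

theorem set_append_last {α : Type} (l : List α) (y v : α) :
    (l ++ [y]).set l.length v = l ++ [v] := by
  induction l with
  | nil => rfl
  | cons a as ih => simp [ih]

theorem getD_append_last (l : List String) (y : String) :
    (l ++ [y]).getD l.length "" = y := by
  simp [List.getD]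

theorem set_last_append (acc R : List String) (hR : R ≠ []) (v : String) :
    (acc ++ R).set ((acc ++ R).length - 1) v = acc ++ (R.dropLast ++ [v]) := by
  rcases List.eq_nil_or_concat R with h | ⟨R', y, rfl⟩
  · exact absurd h hR
  · simp only [List.concat_eq_append, ← List.append_assoc]
    rw [show (acc ++ R' ++ [y]).length - 1 = (acc ++ R').length by simp]
    rw [set_append_last (acc ++ R') y v]
    simp

theorem getD_last_append (acc R : List String) (hR : R ≠ []) :
    (acc ++ R).getD ((acc ++ R).length - 1) "" = R.getLast?.getD "" := by
  rcases List.eq_nil_or_concat R with h | ⟨R', y, rfl⟩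
  · exact absurd h hR
  · simp only [List.concat_eq_append, ← List.append_assoc]
    rw [show (acc ++ R' ++ [y]).length - 1 = (acc ++ R').length by simp]
    rw [getD_append_last (acc ++ R') y]
    simp

theorem inner_fold (cs : List Char) (ts : List String)
    (hbits : ∀ c ∈ cs, c = '0' ∨ c = '1') :
    ∀ (k : Nat), k ≤ cs.length → k ≤ ts.length → ∀ (acc : List String) (p : String),
    (List.range k).foldl
      (fun nl j =>
        let c := cs.getD j ' '
        let nl1 := if c = '0' then nl ++ [ts.getD j ""] else nl
        if c = '1'
          then nl1.set (nl1.length - 1) ((nl1.getD (nl1.length - 1) "") ++ ts.getD j "")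
          else nl1)
      (acc ++ [p])
    = acc ++ rowStr p ((cs.take k).zip (ts.take k)) := by
  intro k
  induction k with
  | zero => intro _ _ acc p; simp [rowStr]
  | succ k ih =>
    intro hk1 hk2 acc p
    rw [List.range_succ, List.foldl_append, ih (by omega) (by omega) acc p]
    have hck : cs.getD k ' ' = cs[k]'(by omega) := List.getD_eq_getElem cs ' ' (by omega)
    have htk : (cs.take (k+1)).zip (ts.take (k+1))
        = (cs.take k).zip (ts.take k) ++ [(cs[k]'(by omega), ts.getD k "")] := by
      rw [List.take_add_one, List.take_add_one,
          List.getElem?_eq_getElem (show k < cs.length by omega),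
          List.getElem?_eq_getElem (show k < ts.length by omega)]
      rw [List.zip_append (by rw [List.length_take, List.length_take]; omega)]
      rw [List.getD_eq_getElem ts "" (by omega)]
      simp
    rw [htk]
    set R := rowStr p ((cs.take k).zip (ts.take k)) with hRdef
    have hR : R ≠ [] := rowStr_ne_nil _ _
    rcases hbits (cs[k]'(by omega)) (List.getElem_mem _) with hc | hc
    · -- bit '0': new element appended
      simp only [List.foldl_cons, List.foldl_nil, hck, hc, reduceIte]
      rw [if_neg (show ('0':Char) ≠ '1' by decide), rowStr_snoc0, List.append_assoc]
    · -- bit '1': merged onto the last element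
      simp only [List.foldl_cons, List.foldl_nil, hck, hc, reduceIte]
      rw [if_neg (show ('1':Char) ≠ '0' by decide)]
      have hset := set_last_append acc R hR
      have hget := getD_last_append acc R hR
      rw [hget, hset, rowStr_snoc1]

theorem pv_flatMap_congr {α β : Type} {l : List α} {f g : α → List β}
    (h : ∀ a ∈ l, f a = g a) : l.flatMap f = l.flatMap g := by
  induction l with
  | nil => rfl
  | cons x xs ih =>
    simp only [List.flatMap_cons, h x (by simp)]
    rw [ih (fun a ha => h a (by simp [ha]))]

theorem B_step (ts1 : List String) (p s : String) :
    ((bitsLists ts1.length).map (fun bs => rowStr p (bs.zip ts1))).flatMap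
      (fun g => [g ++ [s], g.dropLast ++ [(g.getLast?.getD "") ++ s]])
    = (bitsLists (ts1.length + 1)).map (fun bs => rowStr p (bs.zip (ts1 ++ [s]))) := by
  rw [List.flatMap_map]
  rw [show bitsLists (ts1.length + 1)
      = (bitsLists ts1.length).flatMap (fun bs => [bs ++ ['0'], bs ++ ['1']]) from rfl]
  rw [List.map_flatMap]
  apply pv_flatMap_congr
  intro bs hbs
  have hlen : bs.length = ts1.length := bitsLists_length _ bs hbs
  have h0 : (bs ++ ['0']).zip (ts1 ++ [s]) = bs.zip ts1 ++ [('0', s)] := by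
    rw [List.zip_append hlen]; rfl
  have h1 : (bs ++ ['1']).zip (ts1 ++ [s]) = bs.zip ts1 ++ [('1', s)] := by
    rw [List.zip_append hlen]; rfl
  simp only [List.map_cons, List.map_nil, h0, h1, rowStr_snoc0, rowStr_snoc1]

theorem B_fold_int : ∀ (xs : List Int) (ts1 : List String) (p : String),
    xs.foldl
      (fun table x => table.flatMap
        (fun g => [g ++ [PySem.Int.toStr x],
          g.dropLast ++ [(g.getLast?.getD "") ++ PySem.Int.toStr x]]))
      ((bitsLists ts1.length).map (fun bs => rowStr p (bs.zip ts1)))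
    = (bitsLists (ts1.length + xs.length)).map
        (fun bs => rowStr p (bs.zip (ts1 ++ xs.map PySem.Int.toStr))) := by
  intro xs
  induction xs with
  | nil => intro ts1 p; simp
  | cons x xs ih =>
    intro ts1 p
    rw [List.foldl_cons, B_step ts1 p (PySem.Int.toStr x)]
    have h := ih (ts1 ++ [PySem.Int.toStr x]) p
    simp only [List.length_append, List.length_singleton] at h
    rw [h, show ts1 ++ [PySem.Int.toStr x] ++ xs.map PySem.Int.toStr
        = ts1 ++ (x :: xs).map PySem.Int.toStr by simp]
    congr 2
    simp
    omega

theorem foldl_pyRange_zero_eq_range {β : Type} (n : Nat) (f : β → Int → β) (init : β) :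
    (PySem.List.pyRange 0 (n : Int) 1).foldl f init
    = (List.range n).foldl (fun b (j : Nat) => f b (j : Int)) init := by
  rw [PySem.List.pyRange_one, show (((n : Int)) - 0).toNat = n by omega, List.foldl_map]
  exact PySem.List.foldl_congr_mem _ _ _ _ (fun acc x _ => by norm_num)

theorem map_pyRange_zero_eq_range {β : Type} (n : Nat) (f : Int → β) :
    (PySem.List.pyRange 0 (n : Int) 1).map f = (List.range n).map (fun (j : Nat) => f (j : Int)) := by
  rw [PySem.List.pyRange_one, show (((n : Int)) - 0).toNat = n by omega, List.map_map]
  exact List.map_congr_left (fun x _ => by norm_num)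

theorem binAux_chars : ∀ (n : Nat), ∀ c ∈ binAux n, c = '0' ∨ c = '1' := by
  intro n
  induction n using Nat.strong_induction_on with
  | _ n ih =>
    rcases Nat.eq_zero_or_pos n with h0 | h0
    · subst h0; simp [binAux]
    · rw [binAux_pos n h0]
      intro c hc
      rcases List.mem_append.mp hc with h | h
      · exact ih (n / 2) (by omega) c h
      · simp at h; subst h; split_ifs <;> simp

theorem padTo_bits (k i : Nat) : ∀ c ∈ padTo k (binChars i), c = '0' ∨ c = '1' := by
  intro c hc
  rcases List.mem_append.mp hc with h | h
  · left; exact List.eq_of_mem_replicate h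
  · rcases Nat.eq_zero_or_pos i with h0 | h0
    · subst h0; simp [binChars] at h; simp [h]
    · rw [binChars, if_neg (by omega)] at h
      exact binAux_chars i c h

theorem padTo_length_ge (k : Nat) (cs : List Char) : k ≤ (padTo k cs).length := by
  simp [padTo]; omega

theorem ts_getD (list : List Int) (jn : Nat) (h : jn + 1 < list.length) :
    ((list.tail).map PySem.Int.toStr).getD jn "" = PySem.Int.toStr (list.getD (jn + 1) 0) := by
  have htail : list.tail[jn]? = list[jn + 1]? := by
    rw [List.getElem?_tail]
  rw [List.getD_eq_getElem?_getD, List.getD_eq_getElem?_getD, List.getElem?_map, htail,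
      List.getElem?_eq_getElem h]
  rfl

theorem concat_perms_spec : Claim_equal_concat_perms := by
  intro list _hdom hpre
  obtain ⟨hne, -⟩ := hpre
  unfold Spec_concat_perms
  obtain ⟨k, hk⟩ : ∃ k : Nat, list.length = k + 1 := by
    cases list with
    | nil => exact absurd rfl hne
    | cons a l => exact ⟨l.length, by simp⟩
  set p := PySem.Int.toStr (PySem.List.pyGetD list 0 0) with hp
  set ts : List String := (list.tail).map PySem.Int.toStr with hts
  have hts_len : ts.length = k := by simp [hts, hk]
  have hd : PySem.List.len list - 1 = (k : Int) := by
    simp [PySem.List.len_eq, hk]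
  -- A reduces to a map over all bit strings of length k
  have hA : concat_perms list = (bitsLists k).map
      (fun bs => (rowStr p (bs.zip ts)).map (fun s => (PySem.Int.ofStr? s).getD 0)) := by
    rw [concat_perms]
    simp only [hd]
    have hceil : (2 : Int) ^ ((k : Int)).toNat = (((2 ^ k : Nat)) : Int) := by
      push_cast; rfl
    rw [hceil, PySem.List.foldl_append_singleton_eq_map, List.nil_append,
        map_pyRange_zero_eq_range]
    rw [← enum_eq_bitsLists k, List.map_map]
    apply List.map_congr_left
    intro i hi
    simp only [List.mem_range] at hi
    simp only [Function.comp]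
    congr 1
    have hbin : binarystr ((i : Nat) : Int) ((k : Nat) : Int) = padTo k (binChars i) := by
      rw [binarystr_eq _ (by positivity) _]
      simp
    rw [hbin, foldl_pyRange_zero_eq_range]
    have hcong := PySem.List.foldl_congr_mem (List.range k)
      (fun nl jn =>
        let concatc := PySem.List.pyGetD (padTo k (binChars i)) ((jn : Nat) : Int) ' '
        let nl1 := if concatc = '0'
          then nl ++ [PySem.Int.toStr (PySem.List.pyGetD list (((jn : Nat) : Int) + 1) 0)] else nl
        if concatc = '1'
          then nl1.set (nl1.length - 1)
            ((nl1.getD (nl1.length - 1) "")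
              ++ PySem.Int.toStr (PySem.List.pyGetD list (((jn : Nat) : Int) + 1) 0))
          else nl1)
      (fun nl jn =>
        let c := (padTo k (binChars i)).getD jn ' '
        let nl1 := if c = '0' then nl ++ [ts.getD jn ""] else nl
        if c = '1'
          then nl1.set (nl1.length - 1) ((nl1.getD (nl1.length - 1) "") ++ ts.getD jn "")
          else nl1)
      ([p])
      (by
        intro acc jn hjn
        simp only [List.mem_range] at hjn
        beta_reduce
        have e1 : PySem.List.pyGetD (padTo k (binChars i)) ((jn : Nat) : Int) ' '
            = (padTo k (binChars i)).getD jn ' ' := PySem.List.pyGetD_natCast _ _ _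
        have e2 : PySem.Int.toStr (PySem.List.pyGetD list (((jn : Nat) : Int) + 1) 0)
            = ts.getD jn "" := by
          rw [show ((jn : Nat) : Int) + 1 = (((jn + 1 : Nat)) : Int) by push_cast; ring,
              PySem.List.pyGetD_natCast]
          rw [hts, ts_getD list jn (by omega)]
        rw [e1, e2])
    rw [hcong]
    have := inner_fold (padTo k (binChars i)) ts (padTo_bits k i) k
      (padTo_length_ge k _) (by omega) [] p
    simp only [List.nil_append] at this
    rw [this, take_padTo_binChars k i hi, List.take_of_length_le (by omega)]
  -- B reduces to the same map
  have hB : concat_perms_alt list = (bitsLists k).map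
      (fun bs => (rowStr p (bs.zip ts)).map (fun s => (PySem.Int.ofStr? s).getD 0)) := by
    rw [concat_perms_alt]
    simp only [PySem.List.slice_from_one, PySem.List.slice_to_neg_one, PySem.List.pyGet?_neg_one]
    have hinit : ([[p]] : List (List String))
        = (bitsLists 0).map (fun bs => rowStr p (bs.zip ([] : List String))) := by
      simp [bitsLists, rowStr]
    rw [hinit]
    have h := B_fold_int list.tail [] p
    simp only [List.length_nil, List.nil_append, Nat.zero_add] at h
    rw [h, show list.tail.length = k by simp [hk], ← hts, List.map_map]
    rfl
  rw [hA, hB]
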